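-- pv_equiv track=rewrite | github.com/gudwh14/algorithm | boj/etc/캐슬 디펜스.py | solution
-- ===== SOURCE A (Python) =====
-- import itertools
--
-- def find_shot_enemy(N, enemy, archer, D):
--     temp = []
--     a_r = N
--     a_c = archer
--     for r, c in enemy:
--         distance = abs(a_r - r) + abs(a_c - c)
--         if distance <= D:
--             temp.append((r, c, distance))
--
--     temp.sort(key=lambda x: (x[2], x[1]))
--     if temp:
--         return (temp[0][0], temp[0][1])
--     return temp
--
-- def solution(N, M, D, board):
--     answer = 0
--     archers_comb = list(itertools.combinations([n for n in range(M)], 3))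
--     enemies = []
--
--     for i in range(N - 1, -1, -1):
--         for j in range(M):
--             if board[i][j] == 1:
--                 enemies.append((i, j))
--
--     for archers in archers_comb:
--         count = 0
--         enemy = enemies[:]
--         while True:
--             shots = set()
--
--             for archer in archers:
--                 shot = find_shot_enemy(N, enemy, archer, D)
--                 if shot:
--                     shots.add(shot)
--             for shot in shots:
--                 enemy.remove(shot)
--                 count += 1
--             new_enemy = []
--             for i in range(len(enemy)):
--                 new_i = enemy[i][0] + 1
--                 if new_i == N:
--                     continue
--                 new_enemy.append((new_i, enemy[i][1]))
--
--             enemy = new_enemy[:]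
--             if not enemy:
--                 break
--         answer = max(count, answer)
--     return answer
-- ===== SOURCE B (Python) =====
-- import itertools
--
--
-- def solution(N, M, D, board):
--     # Reverse lookup: instead of computing distances of the enemies and
--     # sorting/minimising, each archer scans the board cells it can hit in
--     # increasing (distance, column) order and takes the first occupied one.
--     enemies = [(r, c) for r in range(N) for c in range(M) if board[r][c] == 1]
--     best = 0
--     for archers in itertools.combinations(range(M), 3):
--         alive = set(enemies)
--         count = 0
--         for t in range(N):
--             targets = set()
--             for a in archers:
--                 tgt = None
--                 for d in range(1, min(D, N + M) + 1):
--                     for c in range(M):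
--                         off = abs(a - c)
--                         if off < d and (N - t - d + off, c) in alive:
--                             tgt = (N - t - d + off, c)
--                             break
--                     if tgt is not None:
--                         break
--                 if tgt is not None:
--                     targets.add(tgt)
--             alive -= targets
--             count += len(targets)
--         best = max(best, count)
--     return best
-- ===== Notes on version B (the rewrite author's own statement) =====
-- stated objective: alternative
-- what changed: B replaces A's enemy-side targeting (compute every enemy's distance, sort by (distance, column), take the head, then rewrite the coordinate list each round) by a board-side reverse lookup: each archer scans the cells it can hit in increasing (distance, column) order and takes the first one occupied in a persistent alive-set indexed by original coordinates with a round counter, so no distances over enemies are ever computed and no list is sorted or rebuilt.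
import Mathlib
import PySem

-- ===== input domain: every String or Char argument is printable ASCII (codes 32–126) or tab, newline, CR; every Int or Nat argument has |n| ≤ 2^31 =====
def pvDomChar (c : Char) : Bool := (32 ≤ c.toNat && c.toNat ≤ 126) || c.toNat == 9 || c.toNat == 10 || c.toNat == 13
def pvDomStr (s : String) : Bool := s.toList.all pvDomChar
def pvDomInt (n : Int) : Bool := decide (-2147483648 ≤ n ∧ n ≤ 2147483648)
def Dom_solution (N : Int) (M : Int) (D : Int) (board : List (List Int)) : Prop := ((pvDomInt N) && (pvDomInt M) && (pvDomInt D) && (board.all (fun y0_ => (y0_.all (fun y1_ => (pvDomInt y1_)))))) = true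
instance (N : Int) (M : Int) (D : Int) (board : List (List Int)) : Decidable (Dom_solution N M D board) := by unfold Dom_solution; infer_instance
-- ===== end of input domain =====

-- B chooses each archer's target by scanning the board cells the archer can hit in
-- increasing (distance, column) order over a persistent alive-set with a round counter,
-- instead of A's per-round distance computation, sort and coordinate-list rebuild
-- (objective: alternative).

-- ===== PORT A =====
-- find_shot_enemy: Python returns the tuple (r, c) or the empty list []; ported as Option.
def findShotEnemy (N : Int) (enemy : List (Int × Int)) (archer : Int) (D : Int) :
    Option (Int × Int) :=
  let temp : List (Int × Int × Int) := enemy.foldl (fun acc rc =>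
    let distance := |N - rc.1| + |archer - rc.2|
    if distance ≤ D then acc ++ [(rc.1, rc.2, distance)] else acc) []
  let temp2 := PySem.List.sorted2 temp (fun x => x.2.2) (fun x => x.2.1)
  match temp2 with
  | [] => none
  | t :: _ => some (t.1, t.2.1)

-- the 'while True' loop of A; the fuel only totalizes it (N.toNat + 1 rounds always
-- suffice: every enemy row grows by 1 each round and rows stay < N).
-- 'enemy.remove(shot)' never raises (each shot comes from enemy); '.getD p.1' only totalizes.
-- Python iterates the set 'shots' in hash order; the resulting list and count do not
-- depend on that order, the port iterates it in insertion order.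
def aLoop (N : Int) (D : Int) (archers : List Int) :
    Nat → List (Int × Int) → Int → Int
  | 0, _, count => count
  | fuel + 1, enemy, count =>
    let shots : PySem.Set (Int × Int) := archers.foldl (fun s archer =>
      match findShotEnemy N enemy archer D with
      | some shot => PySem.Set.add s shot
      | none => s) PySem.Set.empty
    let ec := shots.foldl (fun (p : List (Int × Int) × Int) shot =>
      ((PySem.List.remove? p.1 shot).getD p.1, p.2 + 1)) (enemy, count)
    let newEnemy := ec.1.foldl (fun acc rc =>
      if rc.1 + 1 == N then acc else acc ++ [(rc.1 + 1, rc.2)]) []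
    if newEnemy.isEmpty then ec.2 else aLoop N D archers fuel newEnemy ec.2

def solution (N : Int) (M : Int) (D : Int) (board : List (List Int)) : Int :=
  let archersComb := PySem.List.combinations (PySem.List.pyRange 0 M) 3
  let enemies := (PySem.List.pyRange (N - 1) (-1) (-1)).foldl (fun acc i =>
    (PySem.List.pyRange 0 M).foldl (fun acc2 j =>
      if PySem.List.pyGetD (PySem.List.pyGetD board i []) j 0 == 1
      then acc2 ++ [(i, j)] else acc2) acc) []
  archersComb.foldl (fun answer archers =>
    max (aLoop N D archers (N.toNat + 1) enemies 0) answer) 0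

-- ===== PORT B =====
-- inner 'for c in range(M)' with break: first column whose cell at distance d is occupied
def bScanC (N : Int) (t : Int) (a : Int) (d : Int) (alive : PySem.Set (Int × Int)) :
    List Int → Option (Int × Int)
  | [] => none
  | c :: cs =>
    if |a - c| < d ∧ (N - t - d + |a - c|, c) ∈ alive then
      some (N - t - d + |a - c|, c)
    else bScanC N t a d alive cs

-- outer 'for d in range(1, min(D, N + M) + 1)' with break
def bScanD (N : Int) (t : Int) (a : Int) (M : Int) (alive : PySem.Set (Int × Int)) :
    List Int → Option (Int × Int)
  | [] => none
  | d :: ds =>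
    match bScanC N t a d alive (PySem.List.pyRange 0 M) with
    | some x => some x
    | none => bScanD N t a M alive ds

def bFind (N : Int) (M : Int) (D : Int) (t : Int) (a : Int)
    (alive : PySem.Set (Int × Int)) : Option (Int × Int) :=
  bScanD N t a M alive (PySem.List.pyRange 1 (min D (N + M) + 1))

def bTargets (N : Int) (M : Int) (D : Int) (t : Int) (alive : PySem.Set (Int × Int))
    (archers : List Int) : PySem.Set (Int × Int) :=
  archers.foldl (fun s a =>
    match bFind N M D t a alive with
    | some x => PySem.Set.add s x
    | none => s) PySem.Set.empty

-- one round: 'alive -= targets; count += len(targets)'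
def bRound (N : Int) (M : Int) (D : Int) (archers : List Int)
    (st : PySem.Set (Int × Int) × Int) (t : Int) : PySem.Set (Int × Int) × Int :=
  let targets := bTargets N M D t st.1 archers
  (PySem.Set.diff st.1 targets, st.2 + PySem.Set.len targets)

def solution_alt (N : Int) (M : Int) (D : Int) (board : List (List Int)) : Int :=
  let enemies := (PySem.List.pyRange 0 N).flatMap (fun r =>
    ((PySem.List.pyRange 0 M).filter (fun c =>
      PySem.List.pyGetD (PySem.List.pyGetD board r []) c 0 == 1)).map (fun c => (r, c)))
  (PySem.List.combinations (PySem.List.pyRange 0 M) 3).foldl (fun best archers =>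
    max best ((PySem.List.pyRange 0 N).foldl (bRound N M D archers)
      (PySem.Set.ofList enemies, 0)).2) 0

-- ===== PRECONDITION & SPEC =====
-- Pre_ excludes exactly the inputs where A raises IndexError: when there is at least one
-- row and one column to scan, the board must have at least N rows and each of the first N
-- rows at least M columns (with N ≤ 0 or M ≤ 0 no cell is ever indexed and A returns).
def Pre_solution (N : Int) (M : Int) (D : Int) (board : List (List Int)) : Prop :=
  0 < N → 0 < M → (N ≤ (board.length : Int) ∧ ∀ row ∈ board.take N.toNat, M ≤ (row.length : Int))
instance (N : Int) (M : Int) (D : Int) (board : List (List Int)) : Decidable (Pre_solution N M D board) := by unfold Pre_solution; infer_instance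

def pvWitness_solution : Int × Int × Int × List (List Int) :=
  (2, 3, 5, [[1, 0, 0], [0, 0, 1]])

def Spec_solution (N : Int) (M : Int) (D : Int) (board : List (List Int)) (out : Int) : Prop := out = solution_alt N M D board
instance (N : Int) (M : Int) (D : Int) (board : List (List Int)) (out : Int) : Decidable (Spec_solution N M D board out) := by unfold Spec_solution; infer_instance

-- ===== CLAIM (what is proved, stated in full; the proofs are below) =====
def Claim_equal_solution : Prop := ∀ (N : Int) (M : Int) (D : Int) (board : List (List Int)), Dom_solution N M D board → Pre_solution N M D board → Spec_solution N M D board (solution N M D board)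

-- ===== LEMMAS AND PROOFS =====

def pvLex (p q : Int × Int) : Bool :=
  decide (p.1 < q.1) || (!decide (q.1 < p.1) && decide (p.2 < q.2))

theorem pvLex_iff (p q : Int × Int) :
    pvLex p q = true ↔ (p.1 < q.1 ∨ (p.1 = q.1 ∧ p.2 < q.2)) := by
  simp [pvLex]; omega

theorem pvLex_trans {p q r : Int × Int} (h1 : pvLex p q = true) (h2 : pvLex q r = true) :
    pvLex p r = true := by
  rw [pvLex_iff] at *; omega

theorem pvLex_asymm {p q : Int × Int} (h : pvLex p q = true) : pvLex q p = false := by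
  rw [pvLex_iff] at h
  rw [← Bool.not_eq_true, pvLex_iff]; omega

theorem pvLex_total {p q : Int × Int} (h : p ≠ q) :
    pvLex p q = true ∨ pvLex q p = true := by
  rw [pvLex_iff, pvLex_iff]
  rcases p with ⟨a, b⟩; rcases q with ⟨c, d⟩
  simp only [ne_eq, Prod.mk.injEq, not_and] at h
  by_cases hac : a = c
  · subst hac; simp at h ⊢; omega
  · omega

theorem pvLex_negtrans {p q r : Int × Int} (h1 : pvLex p q = false) (h2 : pvLex q r = false) :
    pvLex p r = false := by
  rw [← Bool.not_eq_true, pvLex_iff] at *; omega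

-- unique minimum existence
theorem pv_exists_umin {α : Type} (key : α → Int × Int) :
    ∀ (xs : List α), xs ≠ [] →
      (∀ x ∈ xs, ∀ y ∈ xs, key x = key y → x = y) →
      ∃ w ∈ xs, ∀ y ∈ xs, y ≠ w → pvLex (key w) (key y) = true
  | [], h, _ => absurd rfl h
  | x :: rest, _, hinj => by
    rcases Decidable.em (rest = []) with hr | hr
    · subst hr
      exact ⟨x, List.mem_singleton_self x, by
        intro y hy hne; simp at hy; exact absurd hy hne⟩
    · obtain ⟨w, hw, hmin⟩ := pv_exists_umin key rest hr
        (fun a ha b hb => hinj a (List.mem_cons_of_mem _ ha) b (List.mem_cons_of_mem _ hb))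
      by_cases hlt : pvLex (key x) (key w) = true
      · refine ⟨x, List.mem_cons_self, ?_⟩
        intro y hy hne
        rcases List.mem_cons.mp hy with rfl | hy
        · exact absurd rfl hne
        · by_cases hyw : y = w
          · subst hyw; exact hlt
          · exact pvLex_trans hlt (hmin y hy hyw)
      · refine ⟨w, List.mem_cons_of_mem _ hw, ?_⟩
        intro y hy hne
        rcases List.mem_cons.mp hy with rfl | hy
        · have hxw : y ≠ w := hne
          have hk : key y ≠ key w := by
            intro he
            exact hxw (hinj y List.mem_cons_self w (List.mem_cons_of_mem _ hw) he)
          rcases pvLex_total (p := key y) (q := key w) hk with h | h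
          · exact absurd h hlt
          · exact h
        · exact hmin y hy hne

theorem pv_insertBy_pairwise {α : Type} (key : α → Int × Int) (x : α) :
    ∀ (ys : List α),
      ys.Pairwise (fun a b => pvLex (key b) (key a) = false) →
      (PySem.List.insertBy (fun a b => pvLex (key a) (key b)) x ys).Pairwise
        (fun a b => pvLex (key b) (key a) = false)
  | [], _ => by
    simp [PySem.List.insertBy]
  | y :: ys, h => by
    rw [List.pairwise_cons] at h
    obtain ⟨hy, hys⟩ := h
    by_cases hxy : pvLex (key x) (key y) = true
    · have : PySem.List.insertBy (fun a b => pvLex (key a) (key b)) x (y :: ys)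
          = x :: y :: ys := by simp [PySem.List.insertBy, hxy]
      rw [this, List.pairwise_cons]
      refine ⟨?_, by rw [List.pairwise_cons]; exact ⟨hy, hys⟩⟩
      intro b hb
      rcases List.mem_cons.mp hb with rfl | hb
      · exact pvLex_asymm hxy
      · exact pvLex_negtrans (hy b hb) (pvLex_asymm hxy)
    · have heq : PySem.List.insertBy (fun a b => pvLex (key a) (key b)) x (y :: ys)
          = y :: PySem.List.insertBy (fun a b => pvLex (key a) (key b)) x ys := by
        simp [PySem.List.insertBy, hxy]
      rw [heq, List.pairwise_cons]
      refine ⟨?_, pv_insertBy_pairwise key x ys hys⟩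
      intro b hb
      rcases (PySem.List.insertBy_mem_iff _ _ _ _).mp hb with rfl | hb
      · exact Bool.not_eq_true _ ▸ hxy
      · exact hy b hb

theorem pv_foldl_insertBy_pairwise {α : Type} (key : α → Int × Int) (xs : List α) :
    ∀ (acc : List α), acc.Pairwise (fun a b => pvLex (key b) (key a) = false) →
      (xs.foldl (fun acc x => PySem.List.insertBy (fun a b => pvLex (key a) (key b)) x acc) acc).Pairwise
        (fun a b => pvLex (key b) (key a) = false) := by
  induction xs with
  | nil => intro acc h; exact h
  | cons x xs ih =>
    intro acc h
    exact ih _ (pv_insertBy_pairwise key x acc h)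

theorem pv_sorted2_eq_foldl {α : Type} (k1 k2 : α → Int) (xs : List α) :
    PySem.List.sorted2 xs k1 k2
      = xs.foldl (fun acc x =>
          PySem.List.insertBy (fun a b => pvLex (k1 a, k2 a) (k1 b, k2 b)) x acc) [] := rfl

theorem pv_sorted2_head {α : Type} (k1 k2 : α → Int) (xs : List α) (w : α)
    (hw : w ∈ xs)
    (hmin : ∀ y ∈ xs, y ≠ w → pvLex (k1 w, k2 w) (k1 y, k2 y) = true) :
    ∃ tl, PySem.List.sorted2 xs k1 k2 = w :: tl := by
  have hperm := PySem.List.sorted2_perm xs k1 k2 false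
  have hpw : (PySem.List.sorted2 xs k1 k2).Pairwise
      (fun a b => pvLex (k1 b, k2 b) (k1 a, k2 a) = false) := by
    rw [pv_sorted2_eq_foldl]
    exact pv_foldl_insertBy_pairwise (fun a => (k1 a, k2 a)) xs [] List.Pairwise.nil
  rcases hs : PySem.List.sorted2 xs k1 k2 with _ | ⟨h, tl⟩
  · rw [hs] at hperm
    exact absurd (hperm.symm.eq_nil ▸ hw) (List.not_mem_nil)
  · have hhx : h ∈ xs := hperm.mem_iff.mp (hs ▸ List.mem_cons_self)
    by_cases hhw : h = w
    · exact ⟨tl, by rw [← hhw]⟩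
    · exfalso
      have h1 : pvLex (k1 w, k2 w) (k1 h, k2 h) = true :=
        hmin h hhx hhw
      have hws : w ∈ h :: tl := hs ▸ hperm.symm.mem_iff.mp hw
      rcases List.mem_cons.mp hws with rfl | hwtl
      · exact hhw rfl
      · rw [hs, List.pairwise_cons] at hpw
        have h2 := hpw.1 w hwtl
        simp [h1] at h2

def pvShift (t : Int) (rc : Int × Int) : Int × Int := (rc.1 + t, rc.2)

theorem pvShift_inj {t : Int} {x y : Int × Int} (h : pvShift t x = pvShift t y) : x = y := by
  rcases x with ⟨r, c⟩; rcases y with ⟨r', c'⟩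
  simp [pvShift, Prod.ext_iff] at h ⊢; omega

-- the enemies still on the board in round t
def pvPool (N t : Int) (alive : List (Int × Int)) : List (Int × Int) :=
  alive.filter (fun rc => decide (rc.1 + t < N))

-- the enemies an archer at column a can reach in round t
def pvReach (N D t a : Int) (alive : List (Int × Int)) : List (Int × Int) :=
  alive.filter (fun rc => decide (rc.1 + t < N ∧ N - (rc.1 + t) + |a - rc.2| ≤ D))

-- the offset Manhattan distance of an alive enemy from archer column a in round t
def pvDist (N t a : Int) (rc : Int × Int) : Int := N - (rc.1 + t) + |a - rc.2|

theorem pv_temp_eq (N a D : Int) (enemy : List (Int × Int)) :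
    (enemy.foldl (fun acc rc =>
      let distance := |N - rc.1| + |a - rc.2|
      if distance ≤ D then acc ++ [(rc.1, rc.2, distance)] else acc) [])
    = (enemy.filter (fun rc => decide (|N - rc.1| + |a - rc.2| ≤ D))).map
        (fun rc => (rc.1, rc.2, |N - rc.1| + |a - rc.2|)) := by
  simpa using PySem.List.foldl_append_ite
    (p := fun rc : Int × Int => |N - rc.1| + |a - rc.2| ≤ D)
    (f := fun rc : Int × Int => (rc.1, rc.2, |N - rc.1| + |a - rc.2|)) enemy []

theorem pv_findShot_eq (N a D : Int) (enemy : List (Int × Int)) :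
    findShotEnemy N enemy a D
      = match PySem.List.sorted2
          ((enemy.filter (fun rc => decide (|N - rc.1| + |a - rc.2| ≤ D))).map
            (fun rc => (rc.1, rc.2, |N - rc.1| + |a - rc.2|)))
          (fun x => x.2.2) (fun x => x.2.1) with
        | [] => none
        | t :: _ => some (t.1, t.2.1) := by
  unfold findShotEnemy
  rw [pv_temp_eq]

-- a hit of B's cell scan is a reachable enemy at distance exactly d
theorem pv_hit_mem_reach {N D t a d c : Int} {alive : PySem.Set (Int × Int)}
    (hdD : d ≤ D) (hoff : |a - c| < d) (hmem : (N - t - d + |a - c|, c) ∈ alive) :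
    (N - t - d + |a - c|, c) ∈ pvReach N D t a alive
      ∧ pvDist N t a (N - t - d + |a - c|, c) = d := by
  constructor
  · refine List.mem_filter.mpr ⟨hmem, ?_⟩
    simp only [decide_eq_true_eq]
    constructor <;> omega
  · simp only [pvDist]; omega

theorem pv_scanC_none (N D t a d : Int) (alive : PySem.Set (Int × Int))
    (hdD : d ≤ D)
    (h : ∀ x ∈ pvReach N D t a alive, pvDist N t a x ≠ d) :
    ∀ cs : List Int, bScanC N t a d alive cs = none
  | [] => rfl
  | c :: cs => by
    have hcond : ¬ (|a - c| < d ∧ (N - t - d + |a - c|, c) ∈ alive) := by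
      rintro ⟨hoff, hmem⟩
      obtain ⟨hre, hdist⟩ := pv_hit_mem_reach hdD hoff hmem
      exact h _ hre hdist
    simp only [bScanC, if_neg hcond]
    exact pv_scanC_none N D t a d alive hdD h cs

theorem pv_scanC_hit (N D t a d : Int) (alive : PySem.Set (Int × Int))
    (w : Int × Int) (hw : w ∈ pvReach N D t a alive) (hd : pvDist N t a w = d) :
    ∀ (cs1 : List Int) (cs2 : List Int),
      (∀ c ∈ cs1, ∀ y ∈ pvReach N D t a alive, pvDist N t a y = d → y.2 ≠ c) →
      bScanC N t a d alive (cs1 ++ w.2 :: cs2) = some w := by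
  have hcontR := List.of_mem_filter hw
  simp only [decide_eq_true_eq] at hcontR
  have hrow : w.1 + t < N := hcontR.1
  have hdD : d ≤ D := by
    have := hcontR.2
    simp only [pvDist] at hd
    omega
  have hoffw : |a - w.2| < d := by
    simp only [pvDist] at hd; omega
  have hrw : N - t - d + |a - w.2| = w.1 := by
    simp only [pvDist] at hd; omega
  have hwalive : w ∈ alive := List.mem_of_mem_filter hw
  intro cs1
  induction cs1 with
  | nil =>
    intro cs2 _
    have hmemw : (N - t - d + |a - w.2|, w.2) ∈ alive := by
      rcases w with ⟨wr, wc⟩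
      simp only at hrw
      rw [hrw]
      exact hwalive
    have hcondT : |a - w.2| < d ∧ (N - t - d + |a - w.2|, w.2) ∈ alive := ⟨hoffw, hmemw⟩
    simp only [List.nil_append, bScanC]
    rw [if_pos hcondT]
    rcases w with ⟨wr, wc⟩
    simp only at hrw ⊢
    rw [hrw]
  | cons c cs1 ih =>
    intro cs2 h1
    have hcond : ¬ (|a - c| < d ∧ (N - t - d + |a - c|, c) ∈ alive) := by
      rintro ⟨hoff, hmem⟩
      obtain ⟨hre, hdist⟩ := pv_hit_mem_reach hdD hoff hmem
      exact h1 c List.mem_cons_self _ hre hdist rfl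
    simp only [List.cons_append, bScanC, if_neg hcond]
    exact ih cs2 (fun c' hc' => h1 c' (List.mem_cons_of_mem _ hc'))

theorem pv_scanD_none_prefix (N t a M : Int) (alive : PySem.Set (Int × Int)) :
    ∀ (ds1 ds2 : List Int),
      (∀ d ∈ ds1, bScanC N t a d alive (PySem.List.pyRange 0 M) = none) →
      bScanD N t a M alive (ds1 ++ ds2) = bScanD N t a M alive ds2
  | [], ds2, _ => rfl
  | d :: ds1, ds2, h => by
    simp only [List.cons_append, bScanD, h d List.mem_cons_self]
    exact pv_scanD_none_prefix N t a M alive ds1 ds2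
      (fun d' hd' => h d' (List.mem_cons_of_mem _ hd'))

-- no reachable enemy: the scan finds nothing
theorem pv_bFind_none (N M D t a : Int) (alive : PySem.Set (Int × Int))
    (hre : pvReach N D t a alive = []) :
    bFind N M D t a alive = none := by
  unfold bFind
  have h : ∀ ds : List Int, (∀ d ∈ ds, d ≤ D) → bScanD N t a M alive ds = none := by
    intro ds
    induction ds with
    | nil => intro _; rfl
    | cons d ds ih =>
      intro hds
      have hC : bScanC N t a d alive (PySem.List.pyRange 0 M) = none :=
        pv_scanC_none N D t a d alive (hds d List.mem_cons_self)
          (fun x hx => by rw [hre] at hx; exact absurd hx (List.not_mem_nil)) _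
      simp only [bScanD, hC]
      exact ih (fun d' hd' => hds d' (List.mem_cons_of_mem _ hd'))
  refine h _ ?_
  intro d hd
  have := PySem.List.mem_pyRange_one.mp hd
  omega

-- the scan returns exactly the unique (distance, column)-minimal reachable enemy
theorem pv_bFind_min (N M D t a : Int) (alive : PySem.Set (Int × Int)) (w : Int × Int)
    (ht : 0 ≤ t) (ha0 : 0 ≤ a) (haM : a < M)
    (hb : ∀ x ∈ alive, 0 ≤ x.1 ∧ 0 ≤ x.2 ∧ x.2 < M)
    (hw : w ∈ pvReach N D t a alive)
    (hmin : ∀ y ∈ pvReach N D t a alive, y ≠ w →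
      pvLex (pvDist N t a w, w.2) (pvDist N t a y, y.2) = true) :
    bFind N M D t a alive = some w := by
  have hcontR := List.of_mem_filter hw
  simp only [decide_eq_true_eq] at hcontR
  have hbw := hb w (List.mem_of_mem_filter hw)
  have habs : |a - w.2| < M := by
    rw [abs_sub_lt_iff]; omega
  have habs0 : 0 ≤ |a - w.2| := abs_nonneg _
  have hd1 : 1 ≤ pvDist N t a w := by simp only [pvDist]; omega
  have hdD : pvDist N t a w ≤ D := by simp only [pvDist]; omega
  have hdNM : pvDist N t a w ≤ N + M := by simp only [pvDist]; omega
  have hdmin : pvDist N t a w ≤ min D (N + M) := le_min hdD hdNM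
  unfold bFind
  rw [PySem.List.pyRange_one_append 1 (pvDist N t a w) (min D (N + M) + 1) hd1 (by omega),
    pv_scanD_none_prefix N t a M alive _ _ ?_]
  · rw [PySem.List.pyRange_one_cons (show pvDist N t a w < min D (N + M) + 1 by omega)]
    have hC : bScanC N t a (pvDist N t a w) alive (PySem.List.pyRange 0 M) = some w := by
      rw [PySem.List.pyRange_one_append 0 w.2 M hbw.2.1 (by omega),
        PySem.List.pyRange_one_cons (show w.2 < M from hbw.2.2)]
      refine pv_scanC_hit N D t a (pvDist N t a w) alive w hw rfl _ _ ?_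
      intro c hc y hy hdy hyc
      have hcw : c < w.2 := (PySem.List.mem_pyRange_one.mp hc).2
      have hyw : y ≠ w := by
        intro he; subst he; omega
      have := (pvLex_iff _ _).mp (hmin y hy hyw)
      simp only at this
      omega
    simp only [bScanD, hC]
  · intro d hd
    have hdlt := PySem.List.mem_pyRange_one.mp hd
    refine pv_scanC_none N D t a d alive (by omega) ?_ _
    intro x hx hdx
    by_cases hxw : x = w
    · subst hxw; omega
    · have := (pvLex_iff _ _).mp (hmin x hx hxw)
      simp only at this
      omega

-- A's target equals B's target shifted into current coordinates
theorem pv_shot_eq (N M D t a : Int) (alive enemy : List (Int × Int))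
    (ht : 0 ≤ t) (ha0 : 0 ≤ a) (haM : a < M)
    (hb : ∀ x ∈ alive, 0 ≤ x.1 ∧ 0 ≤ x.2 ∧ x.2 < M)
    (hperm : enemy.Perm ((pvPool N t alive).map (pvShift t))) :
    findShotEnemy N enemy a D
      = (bFind N M D t a alive).map (pvShift t) := by
  have htemp : ((enemy.filter (fun rc => decide (|N - rc.1| + |a - rc.2| ≤ D))).map
        (fun rc => (rc.1, rc.2, |N - rc.1| + |a - rc.2|))).Perm
      ((pvReach N D t a alive).map (fun rc => (rc.1 + t, rc.2, N - (rc.1 + t) + |a - rc.2|))) := by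
    have h1 := (hperm.filter (fun rc => decide (|N - rc.1| + |a - rc.2| ≤ D))).map
      (fun rc : Int × Int => (rc.1, rc.2, |N - rc.1| + |a - rc.2|))
    rw [List.filter_map, List.map_map] at h1
    have h2 : List.filter ((fun rc => decide (|N - rc.1| + |a - rc.2| ≤ D)) ∘ pvShift t)
        (pvPool N t alive) = pvReach N D t a alive := by
      unfold pvPool pvReach
      rw [List.filter_filter]
      apply List.filter_congr
      intro rc _
      by_cases h : rc.1 + t < N
      · have habs : |N - (rc.1 + t)| = N - (rc.1 + t) := abs_of_pos (by omega)
        simp [pvShift, habs, h]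
      · simp [pvShift, h]
    rw [h2] at h1
    have h3 : (pvReach N D t a alive).map
        ((fun rc : Int × Int => (rc.1, rc.2, |N - rc.1| + |a - rc.2|)) ∘ pvShift t)
        = (pvReach N D t a alive).map (fun rc => (rc.1 + t, rc.2, N - (rc.1 + t) + |a - rc.2|)) := by
      apply List.map_congr_left
      intro rc hrc
      have h : rc.1 + t < N := by
        have := List.of_mem_filter hrc
        simp at this; exact this.1
      have habs : |N - (rc.1 + t)| = N - (rc.1 + t) := abs_of_pos (by omega)
      simp [pvShift, habs]
    rw [h3] at h1
    exact h1
  rw [pv_findShot_eq]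
  rcases hR : pvReach N D t a alive with _ | ⟨z, zs⟩
  · have hT : (enemy.filter (fun rc => decide (|N - rc.1| + |a - rc.2| ≤ D))).map
        (fun rc => (rc.1, rc.2, |N - rc.1| + |a - rc.2|)) = [] := by
      have := htemp; rw [hR] at this; exact this.eq_nil
    rw [hT, pv_bFind_none N M D t a alive hR]
    rfl
  · have hne : pvReach N D t a alive ≠ [] := by rw [hR]; simp
    obtain ⟨w, hw, hmin⟩ := pv_exists_umin
      (fun rc => (N - (rc.1 + t) + |a - rc.2|, rc.2)) (pvReach N D t a alive) hne
      (by
        intro x _ y _ hk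
        rcases x with ⟨xr, xc⟩; rcases y with ⟨yr, yc⟩
        simp [Prod.ext_iff] at hk ⊢
        obtain ⟨h1, h2⟩ := hk
        subst h2; omega)
    obtain ⟨tl, htl⟩ := pv_sorted2_head (fun x => x.2.2) (fun x => x.2.1)
      ((enemy.filter (fun rc => decide (|N - rc.1| + |a - rc.2| ≤ D))).map
        (fun rc => (rc.1, rc.2, |N - rc.1| + |a - rc.2|)))
      (w.1 + t, w.2, N - (w.1 + t) + |a - w.2|)
      (htemp.symm.mem_iff.mp (List.mem_map_of_mem hw))
      (by
        intro y hy hne'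
        have hy' := htemp.mem_iff.mp hy
        obtain ⟨z', hz', rfl⟩ := List.mem_map.mp hy'
        have hzw : z' ≠ w := by
          intro he; subst he; exact hne' rfl
        simpa using hmin z' hz' hzw)
    have hBf : bFind N M D t a alive = some w :=
      pv_bFind_min N M D t a alive w ht ha0 haM hb hw
        (by
          intro y hy hyw
          simpa [pvDist] using hmin y hy hyw)
    rw [htl, hBf]
    rfl

theorem pv_findShot_mem {N a D : Int} {enemy : List (Int × Int)} {sh : Int × Int}
    (h : findShotEnemy N enemy a D = some sh) : sh ∈ enemy := by
  rw [pv_findShot_eq] at h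
  rcases hs : PySem.List.sorted2
      ((enemy.filter (fun rc => decide (|N - rc.1| + |a - rc.2| ≤ D))).map
        (fun rc => (rc.1, rc.2, |N - rc.1| + |a - rc.2|)))
      (fun x => x.2.2) (fun x => x.2.1) with _ | ⟨hd, tl⟩
  · rw [hs] at h; exact absurd h (by simp)
  · rw [hs] at h
    have hmem : hd ∈ ((enemy.filter (fun rc => decide (|N - rc.1| + |a - rc.2| ≤ D))).map
        (fun rc => (rc.1, rc.2, |N - rc.1| + |a - rc.2|))) :=
      (PySem.List.sorted2_perm _ _ _ _).mem_iff.mp (hs ▸ List.mem_cons_self)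
    obtain ⟨rc, hrc, rfl⟩ := List.mem_map.mp hmem
    simp at h
    rw [← h]
    exact List.mem_of_mem_filter hrc

theorem pv_map_add (t : Int) (s : PySem.Set (Int × Int)) (x : Int × Int) :
    (PySem.Set.add s x).map (pvShift t) = PySem.Set.add (s.map (pvShift t)) (pvShift t x) := by
  by_cases h : x ∈ s
  · rw [PySem.Set.add_of_mem h, PySem.Set.add_of_mem (List.mem_map_of_mem h)]
  · rw [PySem.Set.add_of_not_mem h, PySem.Set.add_of_not_mem (fun hc => ?_), List.map_append]
    · rfl
    · obtain ⟨y, hy, he⟩ := List.mem_map.mp hc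
      exact h (pvShift_inj he ▸ hy)

-- the set of shots A takes equals B's set of targets, shifted
theorem pv_shots_eq (N M D t : Int) (alive enemy : List (Int × Int))
    (ht : 0 ≤ t)
    (hb : ∀ x ∈ alive, 0 ≤ x.1 ∧ 0 ≤ x.2 ∧ x.2 < M)
    (hperm : enemy.Perm ((pvPool N t alive).map (pvShift t))) :
    ∀ (archers : List Int), (∀ a ∈ archers, 0 ≤ a ∧ a < M) →
      ∀ s : PySem.Set (Int × Int),
      archers.foldl (fun s archer =>
        match findShotEnemy N enemy archer D with
        | some shot => PySem.Set.add s shot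
        | none => s) (s.map (pvShift t))
      = (archers.foldl (fun s a =>
          match bFind N M D t a alive with
          | some x => PySem.Set.add s x
          | none => s) s).map (pvShift t) := by
  intro archers
  induction archers with
  | nil => intro _ s; rfl
  | cons a archers ih =>
    intro ha s
    have haa := ha a List.mem_cons_self
    rw [List.foldl_cons, List.foldl_cons,
      pv_shot_eq N M D t a alive enemy ht haa.1 haa.2 hb hperm]
    rcases hc : bFind N M D t a alive with _ | m
    · simp only [Option.map_none]
      exact ih (fun a' ha' => ha a' (List.mem_cons_of_mem _ ha')) s
    · simp only [Option.map_some]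
      rw [show PySem.Set.add (s.map (pvShift t)) (pvShift t m)
            = (PySem.Set.add s m).map (pvShift t) from (pv_map_add t s m).symm]
      exact ih (fun a' ha' => ha a' (List.mem_cons_of_mem _ ha')) _

theorem pv_shots_nodup (N D : Int) (enemy : List (Int × Int)) (archers : List Int) :
    ∀ s : PySem.Set (Int × Int), s.Nodup →
      (archers.foldl (fun s archer =>
        match findShotEnemy N enemy archer D with
        | some shot => PySem.Set.add s shot
        | none => s) s).Nodup := by
  induction archers with
  | nil => intro s h; exact h
  | cons a archers ih =>
    intro s h
    rcases hf : findShotEnemy N enemy a D with _ | sh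
    · simpa [List.foldl_cons, hf] using ih s h
    · simpa [List.foldl_cons, hf] using ih _ (PySem.Set.nodup_add s sh h)

theorem pv_shots_sub (N D : Int) (enemy : List (Int × Int)) (archers : List Int) :
    ∀ s : PySem.Set (Int × Int), (∀ x ∈ s, x ∈ enemy) →
      ∀ x ∈ (archers.foldl (fun s archer =>
        match findShotEnemy N enemy archer D with
        | some shot => PySem.Set.add s shot
        | none => s) s), x ∈ enemy := by
  induction archers with
  | nil => intro s h; exact h
  | cons a archers ih =>
    intro s h
    rcases hf : findShotEnemy N enemy a D with _ | sh
    · simp only [List.foldl_cons, hf]; exact ih s h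
    · simp only [List.foldl_cons, hf]
      refine ih _ ?_
      intro x hx
      rcases (PySem.Set.mem_add s sh x).mp hx with hx | rfl
      · exact h x hx
      · exact pv_findShot_mem hf

theorem pv_removal_fold (shots : List (Int × Int)) :
    ∀ (enemy : List (Int × Int)) (count : Int), enemy.Nodup → shots.Nodup →
      (∀ sh ∈ shots, sh ∈ enemy) →
      shots.foldl (fun (p : List (Int × Int) × Int) shot =>
          ((PySem.List.remove? p.1 shot).getD p.1, p.2 + 1)) (enemy, count)
        = (enemy.filter (fun e => !shots.contains e), count + (shots.length : Int)) := by
  induction shots with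
  | nil => intro enemy count _ _ _; simp
  | cons sh rest ih =>
    intro enemy count h1 h2 h3
    have hmem : sh ∈ enemy := h3 sh List.mem_cons_self
    rw [List.foldl_cons]
    have hrem : PySem.List.remove? enemy sh = some (enemy.erase sh) :=
      PySem.List.remove?_eq_some_erase enemy sh hmem
    rw [hrem]
    have hsub : ∀ y ∈ rest, y ∈ enemy.erase sh := by
      intro y hy
      exact (List.mem_erase_of_ne
        (fun he => (List.nodup_cons.mp h2).1 (by rw [← he]; exact hy))).mpr
        (h3 y (List.mem_cons_of_mem _ hy))
    rw [show ((some (enemy.erase sh)).getD enemy, count + 1) = (enemy.erase sh, count + 1) from rfl]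
    rw [ih (enemy.erase sh) (count + 1) (h1.erase sh) (List.nodup_cons.mp h2).2 hsub]
    refine Prod.ext ?_ ?_
    · show (enemy.erase sh).filter _ = _
      rw [h1.erase_eq_filter sh, List.filter_filter]
      apply List.filter_congr
      intro x _
      by_cases hx : x = sh
      · subst hx; simp
      · simp [hx, bne_iff_ne]
    · show count + 1 + (rest.length : Int) = count + ((rest.length : Nat) + 1 : Nat)
      push_cast; ring

theorem pv_newEnemy_eq (N : Int) (l : List (Int × Int)) :
    l.foldl (fun acc rc =>
        if rc.1 + 1 == N then acc else acc ++ [(rc.1 + 1, rc.2)]) []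
      = (l.filter (fun rc => !(rc.1 + 1 == N))).map (fun rc => (rc.1 + 1, rc.2)) := by
  have hstep : (fun (acc : List (Int × Int)) (rc : Int × Int) =>
      if rc.1 + 1 == N then acc else acc ++ [(rc.1 + 1, rc.2)])
      = (fun acc rc => if (!(rc.1 + 1 == N)) = true then acc ++ [(rc.1 + 1, rc.2)] else acc) := by
    funext acc rc
    cases h : (rc.1 + 1 == N) <;> simp_all
  rw [hstep, PySem.List.foldl_append_if]
  simp

theorem pv_contains_map_shift (t : Int) (l : List (Int × Int)) (rc : Int × Int) :
    (l.map (pvShift t)).contains (pvShift t rc) = l.contains rc := by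
  by_cases h : rc ∈ l
  · simp only [List.contains_eq_mem]
    rw [decide_eq_true (List.mem_map_of_mem h), decide_eq_true h]
  · simp only [List.contains_eq_mem]
    rw [decide_eq_false (fun hc => ?_), decide_eq_false h]
    obtain ⟨y, hy, he⟩ := List.mem_map.mp hc
    exact h (pvShift_inj he ▸ hy)

theorem pv_filter_map_congr {α β : Type} (l : List α) (p q : α → Bool) (f g : α → β)
    (h1 : ∀ x ∈ l, p x = q x) (h2 : ∀ x ∈ l, p x = true → f x = g x) :
    (l.filter p).map f = (l.filter q).map g := by
  rw [← List.filter_congr h1]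
  apply List.map_congr_left
  intro x hx
  exact h2 x (List.mem_of_mem_filter hx) (List.of_mem_filter hx)

theorem pv_next_perm (N t : Int) (alive tg enemy : List (Int × Int))
    (hperm : enemy.Perm ((pvPool N t alive).map (pvShift t))) :
    (((enemy.filter (fun e => !((tg.map (pvShift t)).contains e))).filter
        (fun rc => !(rc.1 + 1 == N))).map (fun rc => (rc.1 + 1, rc.2))).Perm
      ((pvPool N (t + 1) (PySem.Set.diff alive tg)).map (pvShift (t + 1))) := by
  have h1 := ((hperm.filter (fun e => !((tg.map (pvShift t)).contains e))).filter
      (fun rc => !(rc.1 + 1 == N))).map (fun rc : Int × Int => (rc.1 + 1, rc.2))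
  have he : ((((pvPool N t alive).map (pvShift t)).filter
        (fun e => !((tg.map (pvShift t)).contains e))).filter
        (fun rc => !(rc.1 + 1 == N))).map (fun rc : Int × Int => (rc.1 + 1, rc.2))
      = (pvPool N (t + 1) (PySem.Set.diff alive tg)).map (pvShift (t + 1)) := by
    rw [List.filter_map, List.filter_map, List.map_map, pvPool,
      List.filter_filter, List.filter_filter]
    show _ = ((alive.filter (fun x => !(PySem.Set.contains tg x))).filter
        (fun rc => decide (rc.1 + (t + 1) < N))).map (pvShift (t + 1))
    rw [List.filter_filter]
    apply pv_filter_map_congr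
    · intro rc _
      simp only [Function.comp]
      simp only [pv_contains_map_shift, PySem.Set.contains_eq_listContains]
      simp only [pvShift]
      by_cases hc : rc ∈ tg <;>
        by_cases hlt : rc.1 + t < N <;>
          by_cases heq : rc.1 + t + 1 = N <;>
            simp [hc, hlt, heq, ← add_assoc] <;> (try omega) <;>
              (rw [Bool.eq_iff_iff]; simp [heq]; omega)
    · intro rc _ _
      simp [Function.comp, pvShift]
      omega
  rw [he] at h1
  exact h1

theorem pv_diff_empty {α : Type} [BEq α] (s : PySem.Set α) :
    PySem.Set.diff s PySem.Set.empty = s := by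
  simp [PySem.Set.diff, PySem.Set.empty]

theorem pv_targets_none (N M D t : Int) (alive : PySem.Set (Int × Int)) (archers : List Int)
    (h : ∀ a ∈ archers, bFind N M D t a alive = none) :
    bTargets N M D t alive archers = PySem.Set.empty := by
  unfold bTargets
  induction archers with
  | nil => rfl
  | cons a archers ih =>
    rw [List.foldl_cons, h a List.mem_cons_self]
    exact ih (fun a' ha' => h a' (List.mem_cons_of_mem _ ha'))

-- once no enemy can ever be on the board again, all remaining rounds change nothing
theorem pv_rounds_empty (N M D : Int) (archers : List Int) :
    ∀ (ts : List Int) (alive : PySem.Set (Int × Int)) (t count : Int),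
      (∀ t' ∈ ts, t ≤ t') → (∀ x ∈ alive, ¬ (x.1 + t < N)) →
      ts.foldl (bRound N M D archers) (alive, count) = (alive, count)
  | [], _, _, _, _, _ => rfl
  | t' :: ts, alive, t, count, hts, hal => by
    have hre : ∀ a : Int, pvReach N D t' a alive = [] := by
      intro a
      rw [pvReach, List.filter_eq_nil_iff]
      intro x hx hdec
      simp only [decide_eq_true_eq] at hdec
      have := hal x hx
      have := hts t' List.mem_cons_self
      omega
    have htg : bTargets N M D t' alive archers = PySem.Set.empty :=
      pv_targets_none N M D t' alive archers
        (fun a _ => pv_bFind_none N M D t' a alive (hre a))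
    rw [List.foldl_cons,
      show bRound N M D archers (alive, count) t' = (alive, count) by
        simp only [bRound, htg, pv_diff_empty]
        refine Prod.ext rfl ?_
        show count + PySem.Set.len (PySem.Set.empty : PySem.Set (Int × Int)) = count
        simp [PySem.Set.len, PySem.Set.empty]]
    exact pv_rounds_empty N M D archers ts alive t count
      (fun t'' ht'' => hts t'' (List.mem_cons_of_mem _ ht'')) hal

-- main loop correspondence: A's while-loop vs B's fold over the remaining rounds
theorem pv_loops_eq (N M D : Int) (archers : List Int)
    (ha : ∀ a ∈ archers, 0 ≤ a ∧ a < M) :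
    ∀ (fuel : Nat) (alive : PySem.Set (Int × Int)) (t count : Int)
      (enemy : List (Int × Int)),
      0 ≤ t → (N - t).toNat + 1 ≤ fuel → alive.Nodup →
      (∀ x ∈ alive, 0 ≤ x.1 ∧ 0 ≤ x.2 ∧ x.2 < M) →
      enemy.Perm ((pvPool N t alive).map (pvShift t)) →
      aLoop N D archers fuel enemy count
        = ((PySem.List.pyRange t N).foldl (bRound N M D archers) (alive, count)).2 := by
  intro fuel
  induction fuel with
  | zero => intro alive t count enemy _ hf _ _ _; omega
  | succ fuel ih =>
    intro alive t count enemy ht hf hnd hb hperm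
    by_cases hpool : pvPool N t alive = []
    · -- no enemy is on the board: A's round is a no-op and breaks, B's rounds are no-ops
      have henemy : enemy = [] := by
        have := hperm; rw [hpool] at this; simpa using this.eq_nil
      subst henemy
      have hal : ∀ x ∈ alive, ¬ (x.1 + t < N) := by
        intro x hx hlt
        have : x ∈ pvPool N t alive := List.mem_filter.mpr ⟨hx, by simpa using hlt⟩
        rw [hpool] at this
        exact absurd this (List.not_mem_nil)
      have hfs : ∀ a : Int, findShotEnemy N ([] : List (Int × Int)) a D = none := fun a => rfl
      rw [pv_rounds_empty N M D archers _ alive t count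
        (fun t' ht' => (PySem.List.mem_pyRange_one.mp ht').1) hal]
      simp [aLoop, hfs, PySem.Set.empty]
    · -- some enemy is on the board: both sides execute round t
      obtain ⟨x, hxp⟩ := List.exists_mem_of_ne_nil _ hpool
      have hxa : x ∈ alive := List.mem_of_mem_filter hxp
      have hxlt : x.1 + t < N := by
        have := List.of_mem_filter hxp; simpa using this
      have htN : t < N := by
        have := (hb x hxa).1; omega
      rw [PySem.List.pyRange_one_cons htN, List.foldl_cons]
      have hndE : enemy.Nodup := by
        rw [hperm.nodup_iff]
        exact ((hnd.filter _).map (fun x y h => pvShift_inj h))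
      have hshots : (archers.foldl (fun s archer =>
            match findShotEnemy N enemy archer D with
            | some shot => PySem.Set.add s shot
            | none => s) PySem.Set.empty)
          = (bTargets N M D t alive archers).map (pvShift t) := by
        simpa [PySem.Set.empty, bTargets] using
          pv_shots_eq N M D t alive enemy ht hb hperm archers ha PySem.Set.empty
      have hndS : ((bTargets N M D t alive archers).map (pvShift t)).Nodup := by
        rw [← hshots]
        exact pv_shots_nodup N D enemy archers PySem.Set.empty List.nodup_nil
      have hsub : ∀ x ∈ (bTargets N M D t alive archers).map (pvShift t), x ∈ enemy := by
        rw [← hshots]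
        exact pv_shots_sub N D enemy archers PySem.Set.empty (by simp [PySem.Set.empty])
      simp only [aLoop]
      rw [hshots, pv_removal_fold _ enemy count hndE hndS hsub]
      simp only []
      rw [pv_newEnemy_eq]
      have hlen : (((bTargets N M D t alive archers).map (pvShift t)).length : Int)
          = PySem.Set.len (bTargets N M D t alive archers) := by
        simp [PySem.Set.len]
      have hround : bRound N M D archers (alive, count) t
          = (PySem.Set.diff alive (bTargets N M D t alive archers),
             count + PySem.Set.len (bTargets N M D t alive archers)) := rfl
      have hperm' := pv_next_perm N t alive (bTargets N M D t alive archers) enemy hperm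
      have hb' : ∀ x ∈ PySem.Set.diff alive (bTargets N M D t alive archers),
          0 ≤ x.1 ∧ 0 ≤ x.2 ∧ x.2 < M := by
        intro x hx
        exact hb x ((PySem.Set.mem_diff _ _ _).mp hx).1
      rcases hX : (((enemy.filter (fun e =>
          !(((bTargets N M D t alive archers).map (pvShift t)).contains e))).filter
          (fun rc => !(rc.1 + 1 == N))).map (fun rc => (rc.1 + 1, rc.2))).isEmpty with _ | _
      · -- newEnemy nonempty: A recurses, B folds the remaining rounds via IH
        rw [if_neg (by rw [hX]; simp)]
        rw [hlen, hround]
        exact ih (PySem.Set.diff alive (bTargets N M D t alive archers)) (t + 1) _ _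
          (by omega) (by omega) (PySem.Set.nodup_diff _ _ hnd) hb' hperm'
      · -- newEnemy empty: A breaks, B's remaining rounds are no-ops
        rw [if_pos (by rw [hX])]
        have hnil := List.isEmpty_iff.mp hX
        rw [hnil] at hperm'
        have hpool' : pvPool N (t + 1)
            (PySem.Set.diff alive (bTargets N M D t alive archers)) = [] :=
          List.map_eq_nil_iff.mp hperm'.symm.eq_nil
        have hal' : ∀ x ∈ PySem.Set.diff alive (bTargets N M D t alive archers),
            ¬ (x.1 + (t + 1) < N) := by
          intro x hx hlt
          have : x ∈ pvPool N (t + 1) (PySem.Set.diff alive (bTargets N M D t alive archers)) :=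
            List.mem_filter.mpr ⟨hx, by simpa using hlt⟩
          rw [hpool'] at this
          exact absurd this (List.not_mem_nil)
        rw [hround,
          pv_rounds_empty N M D archers _ _ (t + 1) _
            (fun t' ht' => (PySem.List.mem_pyRange_one.mp ht').1) hal']
        rw [hlen]

theorem pv_enemies_perm (N M : Int) (board : List (List Int)) :
    ((PySem.List.pyRange (N - 1) (-1) (-1)).foldl (fun acc i =>
      (PySem.List.pyRange 0 M).foldl (fun acc2 j =>
        if PySem.List.pyGetD (PySem.List.pyGetD board i []) j 0 == 1
        then acc2 ++ [(i, j)] else acc2) acc) []).Perm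
    ((PySem.List.pyRange 0 N).flatMap (fun r =>
      ((PySem.List.pyRange 0 M).filter (fun c =>
        PySem.List.pyGetD (PySem.List.pyGetD board r []) c 0 == 1)).map (fun c => (r, c)))) := by
  have hblock : ∀ (acc : List (Int × Int)) (i : Int),
      (PySem.List.pyRange 0 M).foldl (fun acc2 j =>
        if PySem.List.pyGetD (PySem.List.pyGetD board i []) j 0 == 1
        then acc2 ++ [(i, j)] else acc2) acc
      = acc ++ ((PySem.List.pyRange 0 M).filter (fun c =>
          PySem.List.pyGetD (PySem.List.pyGetD board i []) c 0 == 1)).map (fun c => (i, c)) :=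
    fun acc i => PySem.List.foldl_append_if _ _ _ _
  have houter : (PySem.List.pyRange (N - 1) (-1) (-1)).foldl (fun acc i =>
      (PySem.List.pyRange 0 M).foldl (fun acc2 j =>
        if PySem.List.pyGetD (PySem.List.pyGetD board i []) j 0 == 1
        then acc2 ++ [(i, j)] else acc2) acc) []
      = (PySem.List.pyRange (N - 1) (-1) (-1)).flatMap (fun i =>
          ((PySem.List.pyRange 0 M).filter (fun c =>
            PySem.List.pyGetD (PySem.List.pyGetD board i []) c 0 == 1)).map (fun c => (i, c))) := by
    rw [show (fun (acc : List (Int × Int)) (i : Int) =>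
        (PySem.List.pyRange 0 M).foldl (fun acc2 j =>
          if PySem.List.pyGetD (PySem.List.pyGetD board i []) j 0 == 1
          then acc2 ++ [(i, j)] else acc2) acc)
        = (fun acc i => acc ++ ((PySem.List.pyRange 0 M).filter (fun c =>
            PySem.List.pyGetD (PySem.List.pyGetD board i []) c 0 == 1)).map (fun c => (i, c)))
      from funext fun acc => funext fun i => hblock acc i]
    rw [PySem.List.foldl_append_eq_flatMap]
    rfl
  rw [houter, PySem.List.pyRange_neg_one_eq_reverse]
  have h0 : (-1 : Int) + 1 = 0 := by norm_num
  have hN : N - 1 + 1 = N := by omega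
  rw [h0, hN]
  exact (List.reverse_perm _).flatMap (fun a _ => List.Perm.refl _)

theorem pv_emB_nodup (N M : Int) (board : List (List Int)) :
    ((PySem.List.pyRange 0 N).flatMap (fun r =>
      ((PySem.List.pyRange 0 M).filter (fun c =>
        PySem.List.pyGetD (PySem.List.pyGetD board r []) c 0 == 1)).map (fun c => (r, c)))).Nodup := by
  rw [List.nodup_flatMap]
  constructor
  · intro r _
    exact ((PySem.List.nodup_pyRange_one 0 M).filter _).map
      (fun c c' h => by simpa using h)
  · refine (PySem.List.nodup_pyRange_one 0 N).imp ?_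
    intro r r' hne
    intro x hx hx'
    obtain ⟨c, _, rfl⟩ := List.mem_map.mp hx
    obtain ⟨c', _, he⟩ := List.mem_map.mp hx'
    have : r = r' := by
      have := he.symm
      simp [Prod.ext_iff] at this
      exact this.1
    exact hne this

theorem pv_init_perm (N M : Int) (board : List (List Int)) :
    ((PySem.List.pyRange (N - 1) (-1) (-1)).foldl (fun acc i =>
      (PySem.List.pyRange 0 M).foldl (fun acc2 j =>
        if PySem.List.pyGetD (PySem.List.pyGetD board i []) j 0 == 1
        then acc2 ++ [(i, j)] else acc2) acc) []).Perm
    ((pvPool N 0 (PySem.Set.ofList ((PySem.List.pyRange 0 N).flatMap (fun r =>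
      ((PySem.List.pyRange 0 M).filter (fun c =>
        PySem.List.pyGetD (PySem.List.pyGetD board r []) c 0 == 1)).map (fun c => (r, c)))))).map
      (pvShift 0)) := by
  have hnd := pv_emB_nodup N M board
  rw [PySem.Set.ofList_eq_self_of_nodup _ hnd]
  have hmemlt : ∀ rc ∈ ((PySem.List.pyRange 0 N).flatMap (fun r =>
      ((PySem.List.pyRange 0 M).filter (fun c =>
        PySem.List.pyGetD (PySem.List.pyGetD board r []) c 0 == 1)).map (fun c => (r, c)))),
      (rc : Int × Int).1 + 0 < N := by
    intro rc hrc
    obtain ⟨r, hr, hrc2⟩ := List.mem_flatMap.mp hrc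
    obtain ⟨c, _, rfl⟩ := List.mem_map.mp hrc2
    have := PySem.List.mem_pyRange_one.mp hr
    simpa using this.2
  have hfil : pvPool N 0 ((PySem.List.pyRange 0 N).flatMap (fun r =>
      ((PySem.List.pyRange 0 M).filter (fun c =>
        PySem.List.pyGetD (PySem.List.pyGetD board r []) c 0 == 1)).map (fun c => (r, c))))
      = ((PySem.List.pyRange 0 N).flatMap (fun r =>
      ((PySem.List.pyRange 0 M).filter (fun c =>
        PySem.List.pyGetD (PySem.List.pyGetD board r []) c 0 == 1)).map (fun c => (r, c)))) := by
    rw [pvPool, List.filter_eq_self]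
    intro rc hrc
    exact decide_eq_true (hmemlt rc hrc)
  rw [hfil]
  have hmap : ∀ l : List (Int × Int), l.map (pvShift 0) = l := by
    intro l
    rw [show pvShift 0 = id from funext fun rc => by simp [pvShift], List.map_id]
  rw [hmap]
  exact pv_enemies_perm N M board

theorem pv_emB_bounds (N M : Int) (board : List (List Int)) :
    ∀ x ∈ PySem.Set.ofList ((PySem.List.pyRange 0 N).flatMap (fun r =>
      ((PySem.List.pyRange 0 M).filter (fun c =>
        PySem.List.pyGetD (PySem.List.pyGetD board r []) c 0 == 1)).map (fun c => (r, c)))),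
      0 ≤ x.1 ∧ 0 ≤ x.2 ∧ x.2 < M := by
  intro x hx
  have hx' := (PySem.Set.mem_ofList _ _).mp hx
  obtain ⟨r, hr, hx2⟩ := List.mem_flatMap.mp hx'
  obtain ⟨c, hc, rfl⟩ := List.mem_map.mp hx2
  have h1 := PySem.List.mem_pyRange_one.mp hr
  have h2 := PySem.List.mem_pyRange_one.mp (List.mem_of_mem_filter hc)
  exact ⟨h1.1, h2.1, h2.2⟩

-- ===== VERDICT (by name: the statement is the Claim_ definition above) =====
theorem solution_spec : Claim_equal_solution := by
  intro N M D board _ _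
  unfold Spec_solution solution solution_alt
  apply PySem.List.foldl_congr_mem
  intro acc archers hmem
  rw [max_comm]
  congr 1
  have ha : ∀ a ∈ archers, 0 ≤ a ∧ a < M := by
    intro a haa
    have := (PySem.List.sublist_of_mem_combinations hmem).subset haa
    exact PySem.List.mem_pyRange_one.mp this
  exact pv_loops_eq N M D archers ha (N.toNat + 1) _ 0 0 _
    (le_refl 0) (by omega) (PySem.Set.nodup_ofList _) (pv_emB_bounds N M board)
    (pv_init_perm N M board)
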